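-- pv_equiv track=rewrite | github.com/joker4002/Enhanced-Coding-Agent-via-Dynamic-Embedding-and-ANN-Search | extract_docs_chunks.py | _split_rst_sections
-- ===== SOURCE A (Python) =====
-- from typing import Iterator, List, Optional, Sequence, Tuple
--
-- def _is_heading_underline(s: str) -> bool:
--     t = s.rstrip("\n")
--     if len(t) < 3:
--         return False
--     ch = t[0]
--     if ch not in "=-~^\"'`:+#.*_":
--         return False
--     return all(c == ch for c in t)
--
-- def _split_rst_sections(lines: List[str]) -> List[Tuple[str, int, int]]:
--     sections: List[Tuple[str, int, int]] = []
--     starts: List[Tuple[str, int]] = []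
--
--     i = 0
--     while i + 1 < len(lines):
--         title = lines[i].rstrip("\n")
--         underline = lines[i + 1]
--         if title.strip() and _is_heading_underline(underline):
--             starts.append((title.strip(), i + 1))
--             i += 2
--             continue
--         i += 1
--
--     if not starts:
--         return [("DOCUMENT", 1, len(lines))]
--
--     first_title, first_ul = starts[0]
--     if first_ul > 2:
--         sections.append(("INTRO", 1, first_ul - 2))
--
--     for idx, (title, underline_line_no) in enumerate(starts):
--         start_line = underline_line_no + 1
--         if idx + 1 < len(starts):
--             next_title, next_ul = starts[idx + 1]
--             end_line = max(next_ul - 2, start_line)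
--         else:
--             end_line = len(lines)
--         sections.append((title, start_line, end_line))
--
--     return sections
-- ===== SOURCE B (Python) =====
-- def _is_heading_underline(s: str) -> bool:
--     t = s.rstrip("\n")
--     if len(t) < 3:
--         return False
--     ch = t[0]
--     if ch not in "=-~^\"'`:+#.*_":
--         return False
--     return all(c == ch for c in t)
--
-- def _split_rst_sections(lines):
--     # single pass: no intermediate `starts` list; close the pending section
--     # as soon as the next heading is found
--     n = len(lines)
--     sections = []
--     pending = None  # (stripped title, underline line number)
--     i = 0
--     while i + 1 < n:
--         title = lines[i].rstrip("\n").strip()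
--         if title and _is_heading_underline(lines[i + 1]):
--             ul = i + 1
--             if pending is None:
--                 if ul > 2:
--                     sections.append(("INTRO", 1, ul - 2))
--             else:
--                 pt, pul = pending
--                 start = pul + 1
--                 sections.append((pt, start, max(ul - 2, start)))
--             pending = (title, ul)
--             i += 2
--         else:
--             i += 1
--     if pending is None:
--         return [("DOCUMENT", 1, n)]
--     pt, pul = pending
--     sections.append((pt, pul + 1, n))
--     return sections
-- ===== Notes on version B (the rewrite author's own statement) =====
-- stated objective: alternative
-- what changed: Replaced A's two-pass design (build a `starts` list, then render sections from it with enumerate lookahead) by a single pass that keeps only the pending heading and closes each section when the next heading is found.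
import Mathlib
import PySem

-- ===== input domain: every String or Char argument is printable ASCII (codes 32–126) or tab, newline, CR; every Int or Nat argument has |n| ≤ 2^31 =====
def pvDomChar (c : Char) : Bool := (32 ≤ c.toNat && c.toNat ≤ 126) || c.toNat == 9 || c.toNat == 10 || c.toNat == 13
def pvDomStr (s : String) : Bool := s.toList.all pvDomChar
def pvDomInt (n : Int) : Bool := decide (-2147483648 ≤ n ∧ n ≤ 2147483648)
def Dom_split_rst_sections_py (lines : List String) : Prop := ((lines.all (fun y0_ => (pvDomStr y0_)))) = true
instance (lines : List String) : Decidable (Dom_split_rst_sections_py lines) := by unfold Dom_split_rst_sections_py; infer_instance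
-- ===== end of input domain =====

-- B is a single-pass re-decomposition of A (no intermediate `starts` list); same return value, objective: simpler/alternative.

-- shared helper: exact port of s.rstrip("\n") (drop trailing '\n' characters)
def rstripNl (cs : List Char) : List Char := (cs.reverse.dropWhile (· == '\n')).reverse

-- shared helper: port of _is_heading_underline (identical in Source A and Source B)
def isHeadingUnderline (s : List Char) : Bool :=
  let t := rstripNl s
  if t.length < 3 then false
  else
    match t with
    | [] => false  -- unreachable: t.length ≥ 3
    | ch :: _ =>
      if !("=-~^\"'`:+#.*_".toList.contains ch) then false
      else t.all (· == ch)

-- ===== PORT A =====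
-- first pass of A: the `starts` list (stripped title, underline index i+1)
def scanA (ls : List (List Char)) (i : Nat) : List (List Char × Nat) :=
  if h : i + 1 < ls.length then
    let title := rstripNl (ls[i]'(by omega))
    let underline := ls[i + 1]'h
    if !(PySem.Chars.strip title).isEmpty && isHeadingUnderline underline then
      (PySem.Chars.strip title, i + 1) :: scanA ls (i + 2)
    else
      scanA ls (i + 1)
  else []
termination_by ls.length - i

-- second pass of A: the enumerate loop over `starts`
def renderA (starts : List (List Char × Nat)) (n : Nat) : List (String × Int × Int) :=
  match starts with
  | [] => []
  | (title, ul) :: rest =>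
    let startLine : Int := (ul : Int) + 1
    let endLine : Int :=
      match rest with
      | (_, nul) :: _ => max ((nul : Int) - 2) startLine
      | [] => (n : Int)
    (String.ofList title, startLine, endLine) :: renderA rest n

def split_rst_sections_py (lines : List String) : List (String × Int × Int) :=
  let ls := lines.map (·.toList)
  let starts := scanA ls 0
  match starts with
  | [] => [("DOCUMENT", 1, (lines.length : Int))]
  | (_, firstUl) :: _ =>
    (if (firstUl : Int) > 2 then [("INTRO", 1, (firstUl : Int) - 2)] else [])
      ++ renderA starts lines.length

-- ===== PORT B =====
-- single pass: close the pending section when the next heading is found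
def scanB (ls : List (List Char)) (i : Nat) (pending : Option (List Char × Nat))
    (acc : List (String × Int × Int)) : List (String × Int × Int) :=
  if h : i + 1 < ls.length then
    let title := PySem.Chars.strip (rstripNl (ls[i]'(by omega)))
    if !title.isEmpty && isHeadingUnderline (ls[i + 1]'h) then
      let ul := i + 1
      let acc' :=
        match pending with
        | none => if (ul : Int) > 2 then acc ++ [("INTRO", 1, (ul : Int) - 2)] else acc
        | some (pt, pul) =>
          let startLine : Int := (pul : Int) + 1
          acc ++ [(String.ofList pt, startLine, max ((ul : Int) - 2) startLine)]
      scanB ls (i + 2) (some (title, ul)) acc'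
    else
      scanB ls (i + 1) pending acc
  else
    match pending with
    | none => [("DOCUMENT", 1, (ls.length : Int))]
    | some (pt, pul) => acc ++ [(String.ofList pt, (pul : Int) + 1, (ls.length : Int))]
termination_by ls.length - i

def split_rst_sections_py_alt (lines : List String) : List (String × Int × Int) :=
  scanB (lines.map (·.toList)) 0 none []

-- ===== PRECONDITION & SPEC =====
def Spec_split_rst_sections_py (lines : List String) (out : List (String × Int × Int)) : Prop := out = split_rst_sections_py_alt lines
instance (lines : List String) (out : List (String × Int × Int)) : Decidable (Spec_split_rst_sections_py lines out) := by unfold Spec_split_rst_sections_py; infer_instance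

-- ===== CLAIM (what is proved, stated in full; the proofs are below) =====
def Claim_equal_split_rst_sections_py : Prop := ∀ (lines : List String), Dom_split_rst_sections_py lines → Spec_split_rst_sections_py lines (split_rst_sections_py lines)

-- ===== LEMMAS AND PROOFS =====

-- with a pending heading, B's remaining loop renders exactly A's second pass
lemma scanB_some (ls : List (List Char)) : ∀ (k i : Nat) (pt : List Char) (pul : Nat)
    (acc : List (String × Int × Int)), ls.length - i ≤ k →
    scanB ls i (some (pt, pul)) acc
      = acc ++ renderA ((pt, pul) :: scanA ls i) ls.length := by
  intro k
  induction k with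
  | zero =>
    intro i pt pul acc hk
    rw [scanB, scanA]
    simp only [dif_neg (by omega : ¬ i + 1 < ls.length)]
    simp [renderA]
  | succ k ih =>
    intro i pt pul acc hk
    by_cases h : i + 1 < ls.length
    · rw [scanB, scanA]
      simp only [dif_pos h]
      by_cases hc : (!(PySem.Chars.strip (rstripNl (ls[i]'(by omega)))).isEmpty
          && isHeadingUnderline (ls[i + 1]'h)) = true
      · simp only [hc, if_true]
        rw [ih (i + 2) _ _ _ (by omega)]
        simp [renderA, List.append_assoc]
      · simp only [hc, Bool.false_eq_true, if_false]
        rw [ih (i + 1) _ _ _ (by omega)]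
    · rw [scanB, scanA]
      simp only [dif_neg h]
      simp [renderA]

-- with no pending heading yet, B's loop equals A's whole post-processing
lemma scanB_none (ls : List (List Char)) : ∀ (k i : Nat), ls.length - i ≤ k →
    scanB ls i none []
      = match scanA ls i with
        | [] => [("DOCUMENT", 1, (ls.length : Int))]
        | (_, firstUl) :: _ =>
          (if (firstUl : Int) > 2 then [("INTRO", 1, (firstUl : Int) - 2)] else [])
            ++ renderA (scanA ls i) ls.length := by
  intro k
  induction k with
  | zero =>
    intro i hk
    rw [scanB, scanA]
    simp only [dif_neg (by omega : ¬ i + 1 < ls.length)]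
  | succ k ih =>
    intro i hk
    by_cases h : i + 1 < ls.length
    · rw [scanB]
      conv_rhs => rw [scanA]
      simp only [dif_pos h]
      by_cases hc : (!(PySem.Chars.strip (rstripNl (ls[i]'(by omega)))).isEmpty
          && isHeadingUnderline (ls[i + 1]'h)) = true
      · simp only [hc, if_true]
        rw [scanB_some ls (ls.length - (i + 2)) (i + 2) _ _ _ (by omega)]
        by_cases hu : ((i : Int) + 1) > 2 <;> simp [hu]
      · simp only [hc, Bool.false_eq_true, if_false]
        exact ih (i + 1) (by omega)
    · rw [scanB, scanA]
      simp only [dif_neg h]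

-- ===== VERDICT (by name: the statement is the Claim_ definition above) =====
theorem split_rst_sections_py_spec : Claim_equal_split_rst_sections_py := by
  intro lines _
  unfold Spec_split_rst_sections_py split_rst_sections_py split_rst_sections_py_alt
  rw [scanB_none (lines.map (·.toList)) (lines.map (·.toList)).length 0 (by omega)]
  simp only [List.length_map]
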